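-- pv_equiv track=rewrite | github.com/arkhash0309/research-paper-intelligence-pipeline | mcp_server/tools/paper_parser_tool.py | deduplicate_papers
-- ===== SOURCE A (Python) =====
-- from typing import Any
--
-- def deduplicate_papers(papers: list[dict[str, Any]]) -> list[dict[str, Any]]:
--     """
--     Remove duplicate papers from a combined list using title similarity.
--
--     Two papers are considered duplicates if their lowercase, stripped titles
--     are identical. When duplicates exist, prefer the arXiv version (has PDF link),
--     then Semantic Scholar.
--
--     Args:
--         papers: List of normalised paper dicts.
--
--     Returns:
--         Deduplicated list with one entry per unique title.
--     """
--     seen_titles: dict[str, dict[str, Any]] = {}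
--
--     for paper in papers:
--         # Normalise the title key for comparison
--         title_key = paper.get("title", "").lower().strip()
--         if not title_key:
--             continue  # Skip papers with no title
--
--         if title_key not in seen_titles:
--             seen_titles[title_key] = paper
--         else:
--             # Prefer arXiv entries because they carry PDF links
--             existing = seen_titles[title_key]
--             if existing.get("source") != "arxiv" and paper.get("source") == "arxiv":
--                 seen_titles[title_key] = paper
--
--     return list(seen_titles.values())
-- ===== SOURCE B (Python) =====
-- from typing import Any
--
--
-- def deduplicate_papers(papers: list[dict[str, Any]]) -> list[dict[str, Any]]:
--     """Group papers by normalized title, then pick first arXiv entry (else first seen) per group."""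
--     groups: dict[str, list[dict[str, Any]]] = {}
--     for paper in papers:
--         title_key = paper.get("title", "").lower().strip()
--         if not title_key:
--             continue
--         groups.setdefault(title_key, []).append(paper)
--
--     return [
--         next((p for p in group if p.get("source") == "arxiv"), group[0])
--         for group in groups.values()
--     ]
-- ===== Notes on version B (the rewrite author's own statement) =====
-- stated objective: alternative
-- what changed: A deduplicates online with a keep-or-replace dict of chosen papers; B first groups all papers by normalized title into a dict of lists, then in a second pass selects per group the first arXiv paper, falling back to the group's first element.
import Mathlib
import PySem

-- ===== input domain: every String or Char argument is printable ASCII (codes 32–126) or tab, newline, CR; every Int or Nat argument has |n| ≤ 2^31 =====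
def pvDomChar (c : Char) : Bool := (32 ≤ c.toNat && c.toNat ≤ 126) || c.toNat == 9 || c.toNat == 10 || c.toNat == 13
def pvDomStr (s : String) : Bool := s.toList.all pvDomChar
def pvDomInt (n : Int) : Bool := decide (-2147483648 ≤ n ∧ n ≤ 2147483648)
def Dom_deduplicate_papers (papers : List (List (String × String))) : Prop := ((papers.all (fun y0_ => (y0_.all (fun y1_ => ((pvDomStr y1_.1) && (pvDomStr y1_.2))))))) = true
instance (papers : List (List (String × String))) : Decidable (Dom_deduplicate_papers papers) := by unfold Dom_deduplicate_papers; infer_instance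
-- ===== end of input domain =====

-- B replaces A's online keep-or-replace dict by a collect-then-select pass (group by normalized
-- title, then pick first arXiv else first-seen per group); objective: alternative decomposition.

-- ===== PORT A =====
-- paper.get(k, default is none) : first-match association lookup
def pvGet? (p : List (String × String)) (k : String) : Option String :=
  (PySem.Dict.mk p).get? k

-- paper.get("title", "").lower().strip()
def pvTitleKey (p : List (String × String)) : String :=
  PySem.Str.strip (PySem.Str.lower ((pvGet? p "title").getD ""))

-- paper.get("source") == "arxiv"
def pvIsArxiv (p : List (String × String)) : Bool :=
  pvGet? p "source" == some "arxiv"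

-- one iteration of A's loop over `papers`
def pvStepA (seen : PySem.Dict String (List (String × String)))
    (paper : List (String × String)) : PySem.Dict String (List (String × String)) :=
  let tk := pvTitleKey paper
  if tk = "" then seen
  else if seen.contains tk = false then seen.insert tk paper
  else
    let existing := seen.getD tk []   -- seen_titles[title_key]; key is present in this branch
    if !pvIsArxiv existing && pvIsArxiv paper then seen.insert tk paper else seen

def deduplicate_papers (papers : List (List (String × String))) : List (List (String × String)) :=
  (papers.foldl pvStepA PySem.Dict.empty).values

-- ===== PORT B =====
-- one iteration of B's grouping loop: groups.setdefault(tk, []).append(paper)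
def pvStepB (groups : PySem.Dict String (List (List (String × String))))
    (paper : List (String × String)) : PySem.Dict String (List (List (String × String))) :=
  let tk := pvTitleKey paper
  if tk = "" then groups else groups.modify tk [] (· ++ [paper])

-- next((p for p in group if p.get("source") == "arxiv"), group[0]); groups are built nonempty,
-- so group[0] never raises and headD's default is never used
def pvPick (group : List (List (String × String))) : List (String × String) :=
  (group.find? pvIsArxiv).getD (group.headD [])

def deduplicate_papers_alt (papers : List (List (String × String))) : List (List (String × String)) :=
  ((papers.foldl pvStepB PySem.Dict.empty).values).map pvPick

-- ===== PRECONDITION & SPEC =====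
def Spec_deduplicate_papers (papers : List (List (String × String))) (out : List (List (String × String))) : Prop := out = deduplicate_papers_alt papers
instance (papers : List (List (String × String))) (out : List (List (String × String))) : Decidable (Spec_deduplicate_papers papers out) := by unfold Spec_deduplicate_papers; infer_instance

-- ===== CLAIM (what is proved, stated in full; the proofs are below) =====
def Claim_equal_deduplicate_papers : Prop := ∀ (papers : List (List (String × String))), Dom_deduplicate_papers papers → Spec_deduplicate_papers papers (deduplicate_papers papers)

-- ===== LEMMAS AND PROOFS =====

-- the invariant tying A's dict of chosen papers to B's dict of groups
def pvRel (d : PySem.Dict String (List (String × String)))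
    (d' : PySem.Dict String (List (List (String × String)))) : Prop :=
  d.items = d'.items.map (fun kg => (kg.1, pvPick kg.2)) ∧
  d'.keys.Nodup ∧ (∀ kg ∈ d'.items, kg.2 ≠ [])

theorem pvPick_single (p : List (String × String)) : pvPick [p] = p := by
  cases h : pvIsArxiv p <;> simp [pvPick, List.find?, h]

theorem pvPick_append (g : List (List (String × String))) (p : List (String × String))
    (hg : g ≠ []) :
    pvPick (g ++ [p]) = if !pvIsArxiv (pvPick g) && pvIsArxiv p then p else pvPick g := by
  cases hf : g.find? pvIsArxiv with
  | some q =>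
    have hq : pvIsArxiv q = true := List.find?_some hf
    simp [pvPick, List.find?_append, hf, hq]
  | none =>
    obtain ⟨x, xs, rfl⟩ := List.exists_cons_of_ne_nil hg
    have hx : pvIsArxiv x = false := by
      simpa using List.find?_eq_none.mp hf x (by simp)
    have hfxs : xs.find? pvIsArxiv = none := by
      simpa [List.find?, hx] using hf
    cases hp : pvIsArxiv p <;>
      simp [pvPick, List.find?_append, hfxs, hx, hp, List.find?]

theorem pvRel_keys {d : PySem.Dict String (List (String × String))}
    {d' : PySem.Dict String (List (List (String × String)))}
    (h : pvRel d d') : d.keys = d'.keys := by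
  simp only [PySem.Dict.keys, h.1, List.map_map]
  apply List.map_congr_left
  intro q _
  rfl

theorem pvRel_step (d : PySem.Dict String (List (String × String)))
    (d' : PySem.Dict String (List (List (String × String))))
    (p : List (String × String)) (h : pvRel d d') :
    pvRel (pvStepA d p) (pvStepB d' p) := by
  obtain ⟨hitems, hnd, hne⟩ := h
  have hkeys : d.keys = d'.keys := pvRel_keys ⟨hitems, hnd, hne⟩
  have hndd : d.keys.Nodup := hkeys ▸ hnd
  have hcont : ∀ k, d.contains k = d'.contains k := by
    intro k
    rw [PySem.Dict.contains_eq_decide_mem_keys, PySem.Dict.contains_eq_decide_mem_keys, hkeys]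
  simp only [pvStepA, pvStepB, hcont]
  -- keep the normalized key opaque so unification never unfolds the string machinery
  generalize pvTitleKey p = tk
  split_ifs with h1 h2 h3
  · exact ⟨hitems, hnd, hne⟩
  · -- fresh key: A inserts the paper, B starts the group [p]
    have hd'getD : d'.getD tk [] = [] :=
      PySem.Dict.getD_of_not_contains d' [] h2
    have hBitems : (d'.modify (tk) [] (· ++ [p])).items
        = d'.items ++ [(tk, [p])] := by
      rw [PySem.Dict.modify, hd'getD, List.nil_append,
        PySem.Dict.items_insert_of_not_contains d' [p] h2]
    refine ⟨?_, ?_, ?_⟩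
    · rw [PySem.Dict.items_insert_of_not_contains d p (by rw [hcont]; exact h2),
        hitems, hBitems, List.map_append]
      simp [pvPick_single]
    · rw [PySem.Dict.modify]
      exact PySem.Dict.nodup_keys_insert d' tk _ hnd
    · intro kg hkg
      rw [hBitems] at hkg
      rcases List.mem_append.mp hkg with h4 | h4
      · exact hne kg h4
      · simp at h4; rw [h4]; simp
  · -- existing entry is not arXiv and the new paper is: A replaces, pick becomes p
    have hc : d'.contains tk = true := by simpa using h2
    obtain ⟨g, hg⟩ : ∃ g, d'.get? tk = some g := by
      cases hgq : d'.get? tk with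
      | none => exact absurd hc (by simp [PySem.Dict.contains_eq_isSome_get?, hgq])
      | some g => exact ⟨g, rfl⟩
    have hgmem : (tk, g) ∈ d'.items := PySem.Dict.mem_items_of_get?_eq_some d' hg
    have hgne : g ≠ [] := hne _ hgmem
    have hdget : d.get? tk = some (pvPick g) := by
      apply (PySem.Dict.get?_eq_some_iff_mem_items d tk (pvPick g) hndd).mpr
      rw [hitems]
      exact List.mem_map_of_mem hgmem
    have hdgetD : d.getD tk [] = pvPick g :=
      PySem.Dict.getD_of_get?_eq_some d [] hdget
    have hd'getD : d'.getD tk [] = g :=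
      PySem.Dict.getD_of_get?_eq_some d' [] hg
    have hBitems : (d'.modify (tk) [] (· ++ [p])).items
        = d'.items.map (fun q => if q.1 == tk then (tk, g ++ [p]) else q) := by
      rw [PySem.Dict.modify, hd'getD,
        PySem.Dict.items_insert_of_contains d' (g ++ [p]) hc]
    rw [hdgetD] at h3
    refine ⟨?_, ?_, ?_⟩
    · rw [PySem.Dict.items_insert_of_contains d p (by rw [hcont]; exact hc),
        hitems, hBitems, List.map_map, List.map_map]
      apply List.map_congr_left
      intro q _
      by_cases hq1 : q.1 = tk
      · simp [Function.comp, hq1, pvPick_append g p hgne, h3]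
      · simp [Function.comp, hq1]
    · rw [PySem.Dict.modify]
      exact PySem.Dict.nodup_keys_insert d' tk _ hnd
    · intro kg hkg
      rw [hBitems] at hkg
      obtain ⟨q, hq, hqe⟩ := List.mem_map.mp hkg
      by_cases hq1 : (q.1 == tk) = true <;>
        simp only [hq1, if_true, Bool.false_eq_true, if_false] at hqe
      · rw [← hqe]; simp
      · rw [← hqe]; exact hne q hq
  · -- existing entry stays: the group grows but its pick is unchanged
    have hc : d'.contains tk = true := by simpa using h2
    obtain ⟨g, hg⟩ : ∃ g, d'.get? tk = some g := by
      cases hgq : d'.get? tk with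
      | none => exact absurd hc (by simp [PySem.Dict.contains_eq_isSome_get?, hgq])
      | some g => exact ⟨g, rfl⟩
    have hgmem : (tk, g) ∈ d'.items := PySem.Dict.mem_items_of_get?_eq_some d' hg
    have hgne : g ≠ [] := hne _ hgmem
    have hdget : d.get? tk = some (pvPick g) := by
      apply (PySem.Dict.get?_eq_some_iff_mem_items d tk (pvPick g) hndd).mpr
      rw [hitems]
      exact List.mem_map_of_mem hgmem
    have hdgetD : d.getD tk [] = pvPick g :=
      PySem.Dict.getD_of_get?_eq_some d [] hdget
    have hd'getD : d'.getD tk [] = g :=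
      PySem.Dict.getD_of_get?_eq_some d' [] hg
    have hBitems : (d'.modify (tk) [] (· ++ [p])).items
        = d'.items.map (fun q => if q.1 == tk then (tk, g ++ [p]) else q) := by
      rw [PySem.Dict.modify, hd'getD,
        PySem.Dict.items_insert_of_contains d' (g ++ [p]) hc]
    have huniq : ∀ q ∈ d'.items, q.1 = tk → q = (tk, g) := by
      intro q hq hq1
      have hq2 : d'.get? q.1 = some q.2 :=
        PySem.Dict.get?_of_mem_items d' (by cases q; exact hq) hnd
      rw [hq1, hg] at hq2
      cases q
      simp_all
    rw [hdgetD] at h3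
    refine ⟨?_, ?_, ?_⟩
    · rw [hitems, hBitems, List.map_map]
      apply List.map_congr_left
      intro q hq
      by_cases hq1 : q.1 = tk
      · have hqe := huniq q hq hq1
        subst hqe
        simp only [Function.comp, beq_self_eq_true, if_true]
        rw [pvPick_append g p hgne, if_neg h3]
      · simp [Function.comp, hq1]
    · rw [PySem.Dict.modify]
      exact PySem.Dict.nodup_keys_insert d' tk _ hnd
    · intro kg hkg
      rw [hBitems] at hkg
      obtain ⟨q, hq, hqe⟩ := List.mem_map.mp hkg
      by_cases hq1 : (q.1 == tk) = true <;>
        simp only [hq1, if_true, Bool.false_eq_true, if_false] at hqe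
      · rw [← hqe]; simp
      · rw [← hqe]; exact hne q hq

theorem pvRel_foldl (papers : List (List (String × String)))
    (d : PySem.Dict String (List (String × String)))
    (d' : PySem.Dict String (List (List (String × String)))) (h : pvRel d d') :
    pvRel (papers.foldl pvStepA d) (papers.foldl pvStepB d') := by
  induction papers generalizing d d' with
  | nil => exact h
  | cons p ps ih =>
    rw [List.foldl_cons, List.foldl_cons]
    exact ih _ _ (pvRel_step d d' p h)

-- ===== VERDICT (by name: the statement is the Claim_ definition above) =====
theorem deduplicate_papers_spec : Claim_equal_deduplicate_papers := by
  intro papers _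
  unfold Spec_deduplicate_papers deduplicate_papers deduplicate_papers_alt
  obtain ⟨hitems, -, -⟩ := pvRel_foldl papers PySem.Dict.empty PySem.Dict.empty
    ⟨rfl, by rw [PySem.Dict.keys_empty]; exact List.nodup_nil, by intro kg hkg; cases hkg⟩
  simp only [PySem.Dict.values, hitems, List.map_map]
  apply List.map_congr_left
  intro q _
  rfl
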